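-- pv_equiv track=rewrite | github.com/GobiQ/rna | structure.py | depth_array
-- ===== SOURCE A (Python) =====
-- from typing import List, Tuple, Dict, Optional
--
-- def depth_array(structure: str) -> List[int]:
--     """Calculate depth at each position in structure"""
--     d = 0
--     out = []
--     for ch in structure:
--         if ch == '(':
--             d += 1
--             out.append(d)
--         elif ch == ')':
--             out.append(d)
--             d -= 1
--         else:
--             out.append(d)
--     return out
-- ===== SOURCE B (Python) =====
-- from typing import List
--
-- def depth_array(structure: str) -> List[int]:
--     """Depth at position i: openers in the prefix through i minus closers strictly before i."""
--     return [structure[:i + 1].count('(') - structure[:i].count(')')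
--             for i in range(len(structure))]
-- ===== Notes on version B (the rewrite author's own statement) =====
-- stated objective: alternative
-- what changed: Replaces A's stateful single-pass counter loop by a stateless per-position recount: the depth at index i is computed from scratch as the number of opening brackets in the prefix through i minus the number of closing brackets strictly before i.
import Mathlib
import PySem

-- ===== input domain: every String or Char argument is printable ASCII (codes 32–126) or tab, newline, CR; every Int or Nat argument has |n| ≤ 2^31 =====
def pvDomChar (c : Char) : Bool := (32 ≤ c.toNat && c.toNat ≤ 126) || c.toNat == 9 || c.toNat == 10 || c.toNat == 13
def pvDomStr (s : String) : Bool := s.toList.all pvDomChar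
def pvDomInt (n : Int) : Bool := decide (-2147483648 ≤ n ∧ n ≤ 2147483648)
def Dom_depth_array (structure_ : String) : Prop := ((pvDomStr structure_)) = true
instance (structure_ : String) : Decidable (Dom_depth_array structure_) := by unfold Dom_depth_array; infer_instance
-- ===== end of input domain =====

-- B replaces A's stateful running-counter loop by a stateless per-position recount: depth at index i = number of opening brackets in the prefix through i minus number of closing brackets strictly before i; alternative decomposition (B is quadratic, A linear).

-- ===== PORT A =====
-- A: single pass, mutable depth d and output list; an opener appends the post-increment depth, a closer the pre-decrement depth.
def depth_array (structure_ : String) : List Int :=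
  (structure_.toList.foldl
    (fun (st : Int × List Int) ch =>
      if ch = '(' then (st.1 + 1, st.2 ++ [st.1 + 1])
      else if ch = ')' then (st.1 - 1, st.2 ++ [st.1])
      else (st.1, st.2 ++ [st.1]))
    (0, [])).2

-- ===== PORT B =====
-- B: for each i in range(len(s)), recount openers in s[:i+1] and closers in s[:i] — no running state.
def depth_array_alt (structure_ : String) : List Int :=
  (PySem.List.pyRange 0 (PySem.Str.len structure_) 1).map
    (fun i =>
      ((PySem.Str.count (PySem.Str.slice structure_ none (some (i + 1))) "(" : Int)
       - (PySem.Str.count (PySem.Str.slice structure_ none (some i)) ")" : Int)))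

-- ===== PRECONDITION & SPEC =====
def Spec_depth_array (structure_ : String) (out : List Int) : Prop := out = depth_array_alt structure_
instance (structure_ : String) (out : List Int) : Decidable (Spec_depth_array structure_ out) := by unfold Spec_depth_array; infer_instance

-- ===== CLAIM (what is proved, stated in full; the proofs are below) =====
def Claim_equal_depth_array : Prop := ∀ (structure_ : String), Dom_depth_array structure_ → Spec_depth_array structure_ (depth_array structure_)

-- ===== LEMMAS AND PROOFS =====

-- str.count with a single-character needle is element count
theorem count_go_single (c : Char) : ∀ (fuel : Nat) (l : List Char) (acc : Nat),
    l.length ≤ fuel → PySem.Chars.count.go [c] fuel l acc = acc + l.count c := by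
  intro fuel
  induction fuel with
  | zero =>
    intro l acc h
    cases l with
    | nil => simp [PySem.Chars.count.go]
    | cons a t => simp at h
  | succ n ih =>
    intro l acc h
    cases l with
    | nil => simp [PySem.Chars.count.go]
    | cons a t =>
      by_cases hc : c = a
      · subst hc
        simp only [PySem.Chars.count.go, List.isPrefixOf, BEq.rfl, Bool.and_self,
          if_true, List.length_cons, List.drop_succ_cons]
        simp only [List.length_nil, List.drop_zero]
        rw [ih t (acc + 1) (by simpa using Nat.lt_succ_iff.mp (by simpa using h))]
        simp [List.count_cons]
        omega
      · have hpre : [c].isPrefixOf (a :: t) = false := by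
          simp [List.isPrefixOf, hc]
        simp only [PySem.Chars.count.go, hpre, if_false, Bool.false_eq_true]
        rw [ih t acc (by simpa using Nat.lt_succ_iff.mp (by simpa using h))]
        simp [List.count_cons, eq_comm, hc]

theorem chars_count_single (l : List Char) (c : Char) :
    PySem.Chars.count l [c] = l.count c := by
  simp only [PySem.Chars.count, List.isEmpty_cons, Bool.false_eq_true, if_false]
  simpa using count_go_single c l.length l 0 (le_refl _)

-- A's loop produces the per-position counting formula (shifted by the incoming depth d)
theorem depth_loop_eq (cs : List Char) : ∀ (d : Int) (out : List Int),
    (cs.foldl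
      (fun (st : Int × List Int) ch =>
        if ch = '(' then (st.1 + 1, st.2 ++ [st.1 + 1])
        else if ch = ')' then (st.1 - 1, st.2 ++ [st.1])
        else (st.1, st.2 ++ [st.1]))
      (d, out)).2
    = out ++ (List.range cs.length).map
        (fun k => d + (((cs.take (k + 1)).count '(' : Int)
                     - ((cs.take k).count ')' : Int))) := by
  induction cs with
  | nil => intro d out; simp
  | cons ch cs ih =>
    intro d out
    have step : ∀ (d' v : Int),
        d' = d + (if ch = '(' then 1 else 0) - (if ch = ')' then 1 else 0) →
        v = d + (if ch = '(' then 1 else 0) →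
        (cs.foldl
          (fun (st : Int × List Int) c =>
            if c = '(' then (st.1 + 1, st.2 ++ [st.1 + 1])
            else if c = ')' then (st.1 - 1, st.2 ++ [st.1])
            else (st.1, st.2 ++ [st.1]))
          (d', out ++ [v])).2
        = out ++ (List.range (cs.length + 1)).map
            (fun k => d + ((((ch :: cs).take (k + 1)).count '(' : Int)
                         - (((ch :: cs).take k).count ')' : Int))) := by
      intro d' v hd hv
      rw [ih d' (out ++ [v])]
      rw [List.range_succ_eq_map, List.map_cons, List.map_map]
      have h0 : d + ((((ch :: cs).take 1).count '(' : Int)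
                   - (((ch :: cs).take 0).count ')' : Int)) = v := by
        by_cases h1 : ch = '(' <;> simp [h1, hv, List.count_cons]
      have hmap : (List.range cs.length).map
            ((fun k => d + ((((ch :: cs).take (k + 1)).count '(' : Int)
                          - (((ch :: cs).take k).count ')' : Int))) ∘ Nat.succ)
          = (List.range cs.length).map
            (fun k => d' + (((cs.take (k + 1)).count '(' : Int)
                          - ((cs.take k).count ')' : Int))) := by
        apply List.map_congr_left
        intro k _
        simp only [Function.comp_apply, List.take_succ_cons, List.count_cons, hd]
        by_cases h1 : ch = '(' <;> by_cases h2 : ch = ')' <;>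
          simp [h1, h2] <;> push_cast <;> ring
      rw [hmap, h0]
      simp
    by_cases h1 : ch = '('
    · simpa [h1, List.foldl_cons] using
        step (d + 1) (d + 1) (by simp [h1]) (by simp [h1])
    · by_cases h2 : ch = ')'
      · simpa [h1, h2, List.foldl_cons] using
          step (d - 1) d (by simp [h1, h2]) (by simp [h1, h2])
      · simpa [h1, h2, List.foldl_cons] using
          step d d (by simp [h1, h2]) (by simp [h1, h2])

-- B unfolds to the same counting formula over List.range
theorem alt_eq_formula (s : String) :
    depth_array_alt s
    = (List.range s.toList.length).map
        (fun k => (((s.toList.take (k + 1)).count '(' : Int)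
                 - ((s.toList.take k).count ')' : Int))) := by
  unfold depth_array_alt
  rw [show PySem.Str.len s = ((s.toList.length : Nat) : Int) by simp [PySem.Str.len_eq],
    PySem.List.pyRange_zero, List.map_map]
  apply List.map_congr_left
  intro k _
  simp only [Function.comp_apply, PySem.Str.count_eq, PySem.Str.toList_slice,
    PySem.Chars.slice_eq_listSlice]
  rw [PySem.List.slice_to _ (by positivity : (0:Int) ≤ (k : Int) + 1),
    PySem.List.slice_to _ (by positivity : (0:Int) ≤ (k : Int))]
  have h1 : ((k : Int) + 1).toNat = k + 1 := by omega
  have h2 : ((k : Int)).toNat = k := by omega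
  rw [h1, h2]
  simp [show ("(" : String).toList = ['('] from rfl,
    show (")" : String).toList = [')'] from rfl, chars_count_single]

-- ===== VERDICT (by name: the statement is the Claim_ definition above) =====
theorem depth_array_spec : Claim_equal_depth_array := by
  intro s _
  unfold Spec_depth_array depth_array
  rw [alt_eq_formula]
  simpa using depth_loop_eq s.toList 0 []
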